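-- pv_equiv track=rewrite | github.com/Amundeep-Dhaliwal/Codility_solutions | sorting.py | solution
-- ===== SOURCE A (Python) =====
-- from bisect import bisect_right, bisect_left
--
-- def solution(A):
--     start = [center - radius for center, radius in enumerate(A)]
--     start.sort()
--     pairs = 0
--     for i in range(len(A)):
--         end = i + A[i]
--         count = bisect_right(start,end)-1
--         count_1 = count - i
--         pairs += count_1
--         if pairs > 10_000_000:
--             return -1
--     return pairs
-- ===== SOURCE B (Python) =====
-- def solution(A):
--     n = len(A)
--     lows = sorted(c - r for c, r in enumerate(A))
--     order = sorted(range(n), key=lambda i: i + A[i])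
--     j = 0
--     cnt = []
--     for idx in order:
--         e = idx + A[idx]
--         while j < n and lows[j] <= e:
--             j += 1
--         cnt.append((idx, j))
--     cnt.sort(key=lambda t: t[0])
--     pairs = 0
--     for idx, c in cnt:
--         pairs += c - 1 - idx
--         if pairs > 10_000_000:
--             return -1
--     return pairs
-- ===== Notes on version B (the rewrite author's own statement) =====
-- stated objective: alternative
-- what changed: B replaces A's per-element binary search (bisect_right for each disc end) by a single two-pointer merge over the discs taken in ascending end order, producing all counts in one linear sweep, then replays the accumulation with the same overflow check in original index order.
import Mathlib
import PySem

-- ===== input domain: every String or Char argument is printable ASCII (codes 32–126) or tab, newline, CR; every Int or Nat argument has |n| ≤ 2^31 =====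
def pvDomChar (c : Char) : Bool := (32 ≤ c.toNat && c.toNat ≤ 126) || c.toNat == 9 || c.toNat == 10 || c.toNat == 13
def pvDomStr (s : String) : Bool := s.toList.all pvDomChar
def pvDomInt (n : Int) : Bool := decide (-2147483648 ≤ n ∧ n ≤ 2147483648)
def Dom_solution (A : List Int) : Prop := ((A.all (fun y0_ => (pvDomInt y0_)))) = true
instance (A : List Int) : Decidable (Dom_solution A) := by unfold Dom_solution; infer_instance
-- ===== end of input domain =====

-- B replaces A's per-element bisect_right by a single two-pointer merge in ascending end order; same result, same overflow check.

-- ===== PORT A =====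
-- for i in range(len(A)): end = i+A[i]; count = bisect_right(start,end)-1; pairs += count-i; if pairs > 1e7: return -1
def aLoop (A start : List Int) (is : List Int) (pairs : Int) : Int :=
  match is with
  | [] => pairs
  | i :: rest =>
    let e := i + PySem.List.pyGetD A i 0
    let count : Int := (PySem.List.bisectRight start e : Int) - 1
    let pairs' := pairs + (count - i)
    if pairs' > 10000000 then -1 else aLoop A start rest pairs'

def solution (A : List Int) : Int :=
  let start := PySem.List.sorted ((PySem.List.enumerate A).map (fun p => p.1 - p.2)) (fun x => x)
  aLoop A start (PySem.List.pyRange 0 (A.length : Int) 1) 0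

-- ===== PORT B =====
-- while j < n and lows[j] <= e: j += 1   (the two-pointer advance; index j is always 0 ≤ j)
def bAdv (lows : List Int) (e : Int) (j : Nat) : Nat :=
  if h : j < lows.length ∧ PySem.List.pyGetD lows (j : Int) 0 ≤ e then bAdv lows e (j + 1) else j
termination_by lows.length - j
decreasing_by omega

-- for idx in order: e = idx + A[idx]; advance j; cnt.append((idx, j))
def bScan (A lows : List Int) (order : List Int) (j : Nat) (cnt : List (Int × Nat)) : List (Int × Nat) :=
  match order with
  | [] => cnt
  | idx :: rest =>
    let j' := bAdv lows (idx + PySem.List.pyGetD A idx 0) j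
    bScan A lows rest j' (cnt ++ [(idx, j')])

-- for idx, c in cnt: pairs += c - 1 - idx; if pairs > 1e7: return -1
def bSum (cnt : List (Int × Nat)) (pairs : Int) : Int :=
  match cnt with
  | [] => pairs
  | (idx, c) :: rest =>
    let pairs' := pairs + ((c : Int) - 1 - idx)
    if pairs' > 10000000 then -1 else bSum rest pairs'

def solution_alt (A : List Int) : Int :=
  let lows := PySem.List.sorted ((PySem.List.enumerate A).map (fun p => p.1 - p.2)) (fun x => x)
  let order := PySem.List.sorted (PySem.List.pyRange 0 (A.length : Int) 1)
      (fun i => i + PySem.List.pyGetD A i 0)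
  bSum (PySem.List.sorted (bScan A lows order 0 []) (fun t => t.1)) 0

-- ===== PRECONDITION & SPEC =====
def Spec_solution (A : List Int) (out : Int) : Prop := out = solution_alt A
instance (A : List Int) (out : Int) : Decidable (Spec_solution A out) := by unfold Spec_solution; infer_instance

-- ===== CLAIM (what is proved, stated in full; the proofs are below) =====
def Claim_equal_solution : Prop := ∀ (A : List Int), Dom_solution A → Spec_solution A (solution A)

-- ===== LEMMAS AND PROOFS =====

-- the two-pointer advance lands exactly at bisect_right, whenever it starts at or below it
theorem bAdv_eq_bisectRight (lows : List Int) (hs : List.Pairwise (· ≤ ·) lows)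
    (e : Int) (j : Nat) (hj : j ≤ PySem.List.bisectRight lows e) :
    bAdv lows e j = PySem.List.bisectRight lows e := by
  obtain ⟨hle, h2, h3⟩ := PySem.List.bisectRight_spec lows e hs
  fun_induction bAdv lows e j with
  | case1 j h ih =>
    apply ih
    rcases Nat.lt_or_ge j (PySem.List.bisectRight lows e) with hlt | hge
    · omega
    · exfalso
      have hxe := h3 j h.1 hge
      have : PySem.List.pyGetD lows (j : Int) 0 = lows[j] := by
        simp [PySem.List.pyGetD_natCast, h.1]
      omega
  | case2 j h =>
    rcases Nat.lt_or_ge j (PySem.List.bisectRight lows e) with hlt | hge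
    · exfalso
      have hjl : j < lows.length := by omega
      have := h2 j hjl hlt
      have : PySem.List.pyGetD lows (j : Int) 0 = lows[j] := by
        simp [PySem.List.pyGetD_natCast, hjl]
      omega
    · omega

theorem bisectRight_mono (lows : List Int) (hs : List.Pairwise (· ≤ ·) lows)
    {x y : Int} (hxy : x ≤ y) :
    PySem.List.bisectRight lows x ≤ PySem.List.bisectRight lows y := by
  by_contra hc
  rcases Nat.lt_or_ge (PySem.List.bisectRight lows y) (PySem.List.bisectRight lows x) with hlt | hge
  · obtain ⟨hleX, h2X, h3X⟩ := PySem.List.bisectRight_spec lows x hs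
    obtain ⟨hleY, h2Y, h3Y⟩ := PySem.List.bisectRight_spec lows y hs
    have hj : PySem.List.bisectRight lows y < lows.length := by omega
    have := h2X _ hj hlt
    have := h3Y _ hj (le_refl _)
    omega
  · omega

-- the merge sweep records bisect_right of every end, in end-sorted order
theorem bScan_eq_map (A lows : List Int) (hs : List.Pairwise (· ≤ ·) lows) :
    ∀ (order : List Int) (j : Nat) (cnt : List (Int × Nat)),
    (∀ k ∈ order, j ≤ PySem.List.bisectRight lows (k + PySem.List.pyGetD A k 0)) →
    List.Pairwise (fun a b => a + PySem.List.pyGetD A a 0 ≤ b + PySem.List.pyGetD A b 0) order →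
    bScan A lows order j cnt =
      cnt ++ order.map (fun k => (k, PySem.List.bisectRight lows (k + PySem.List.pyGetD A k 0))) := by
  intro order
  induction order with
  | nil => intro j cnt _ _; simp [bScan]
  | cons idx rest ih =>
    intro j cnt hj hpw
    have hjh : j ≤ PySem.List.bisectRight lows (idx + PySem.List.pyGetD A idx 0) :=
      hj idx (by simp)
    have hadv := bAdv_eq_bisectRight lows hs (idx + PySem.List.pyGetD A idx 0) j hjh
    rw [bScan]
    simp only [hadv]
    rw [ih _ _ ?_ (List.Pairwise.of_cons hpw)]
    · simp
    · intro k hk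
      exact bisectRight_mono lows hs (List.rel_of_pairwise_cons hpw hk)

-- A's accumulation loop is B's accumulation loop over the (index, count) pairs
theorem aLoop_eq_bSum (A lows : List Int) :
    ∀ (is : List Int) (pairs : Int),
    aLoop A lows is pairs =
      bSum (is.map (fun i => (i, PySem.List.bisectRight lows (i + PySem.List.pyGetD A i 0)))) pairs := by
  intro is
  induction is with
  | nil => intro pairs; simp [aLoop, bSum]
  | cons i rest ih =>
    intro pairs
    rw [List.map_cons, aLoop, bSum]
    by_cases h1 : pairs + ((PySem.List.bisectRight lows (i + PySem.List.pyGetD A i 0) : Int) - 1 - i) > 10000000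
    · rw [if_pos h1, if_pos h1]
    · rw [if_neg h1, if_neg h1, ih]

-- ===== VERDICT (by name: the statement is the Claim_ definition above) =====
theorem solution_spec : Claim_equal_solution := by
  intro A _
  unfold Spec_solution solution solution_alt
  have hs : List.Pairwise (· ≤ ·)
      (PySem.List.sorted ((PySem.List.enumerate A).map (fun p => p.1 - p.2)) (fun x => x)) := by
    simpa using PySem.List.sorted_pairwise ((PySem.List.enumerate A).map (fun p => p.1 - p.2)) (fun x => x)
  have hscan := bScan_eq_map A _ hs
      (PySem.List.sorted (PySem.List.pyRange 0 (A.length : Int) 1) (fun i => i + PySem.List.pyGetD A i 0))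
      0 [] (fun k _ => Nat.zero_le _)
      (PySem.List.sorted_pairwise (PySem.List.pyRange 0 (A.length : Int) 1) (fun i => i + PySem.List.pyGetD A i 0))
  have hsorted : PySem.List.sorted
      ((PySem.List.sorted (PySem.List.pyRange 0 (A.length : Int) 1) (fun i => i + PySem.List.pyGetD A i 0)).map
        (fun k => (k, PySem.List.bisectRight
          (PySem.List.sorted ((PySem.List.enumerate A).map (fun p => p.1 - p.2)) (fun x => x))
          (k + PySem.List.pyGetD A k 0))))
      (fun t => t.1) =
      (PySem.List.pyRange 0 (A.length : Int) 1).map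
        (fun k => (k, PySem.List.bisectRight
          (PySem.List.sorted ((PySem.List.enumerate A).map (fun p => p.1 - p.2)) (fun x => x))
          (k + PySem.List.pyGetD A k 0))) := by
    apply PySem.List.sorted_eq_of_perm_of_pairwise_lt
    · exact (List.Perm.map _ (PySem.List.sorted_perm _ _ _)).symm
    · exact List.Pairwise.map _ (fun a b h => h) (PySem.List.pairwise_lt_pyRange_one 0 (A.length : Int))
  simp only [hscan, List.nil_append, hsorted]
  exact aLoop_eq_bSum A _ _ 0
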